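-- pv_equiv track=rewrite | github.com/nilin/cancellations | AS_HEAVY.py | memorybatchlimit
-- ===== SOURCE A (Python) =====
-- import math
--
-- heavy_threshold=8
--
-- def memorybatchlimit(n):
-- 	s=1
-- 	memlim=50000
-- 	while(s*math.factorial(n)<memlim):
-- 		s=s*2
--
-- 	if n>heavy_threshold:
-- 		assert s==1, 'AS_HEAVY assumes single samples'
--
-- 	return s
-- ===== SOURCE B (Python) =====
-- import math
--
-- heavy_threshold = 8
--
-- def memorybatchlimit(n):
--     f = math.factorial(n)
--     memlim = 50000
--     v = -(-memlim // f)          # ceil(memlim / f), exact integer arithmetic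
--     s = 1 << (v - 1).bit_length()  # smallest power of two >= v
--
--     if n > heavy_threshold:
--         assert s == 1, 'AS_HEAVY assumes single samples'
--
--     return s
-- ===== Notes on version B (the rewrite author's own statement) =====
-- stated objective: simpler
-- what changed: Replaced the doubling while-loop with a closed-form computation: factorial once, ceiling division -(-memlim//f), and 1 << (v-1).bit_length() for the smallest power of two >= v.
import Mathlib
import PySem

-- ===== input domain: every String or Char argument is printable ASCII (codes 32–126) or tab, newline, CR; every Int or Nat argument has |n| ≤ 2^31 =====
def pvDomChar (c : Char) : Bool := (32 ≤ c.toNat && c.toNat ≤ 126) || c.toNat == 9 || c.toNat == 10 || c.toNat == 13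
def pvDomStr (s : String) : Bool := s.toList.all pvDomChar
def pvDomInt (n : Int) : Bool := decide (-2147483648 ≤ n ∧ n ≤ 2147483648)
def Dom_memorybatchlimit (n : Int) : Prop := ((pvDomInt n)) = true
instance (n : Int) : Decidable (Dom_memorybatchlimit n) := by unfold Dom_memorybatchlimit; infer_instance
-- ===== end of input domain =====

-- B replaces A's doubling while-loop by a closed-form: ceiling division then bit_length (objective: simpler).

-- ===== PORT A =====
-- the while loop 's=s*2 while s*factorial(n) < 50000', as structural recursion on a
-- fuel counter (fuel 50000 is never exhausted: s doubles from 1, so ≤ 17 iterations)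
def pvMemLoopA (f : Nat) : Nat → Nat → Nat
  | 0, s => s
  | fuel + 1, s => if s * f < 50000 then pvMemLoopA f fuel (s * 2) else s

def memorybatchlimit (n : Int) : Int :=
  -- s = 1; memlim = 50000; while s*factorial(n) < memlim: s = s*2
  let s : Nat := pvMemLoopA (Nat.factorial n.toNat) 50000 1
  -- 'if n > heavy_threshold: assert s == 1' — the assert never fires for n ≥ 0
  -- (factorial(9) = 362880 ≥ 50000, so the loop body never runs there and s = 1)
  (s : Int)

-- ===== PORT B =====
def memorybatchlimit_alt (n : Int) : Int :=
  let f : Int := (Nat.factorial n.toNat : Int)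
  let v : Int := -(PySem.Int.floordiv (-50000) f)      -- v = -(-memlim // f)
  let s : Int := (1 : Int) <<< PySem.Int.bitLength (v - 1)  -- s = 1 << (v-1).bit_length()
  -- the assert in Source B never fires for n ≥ 0 (same reason as in A)
  s

-- ===== PRECONDITION & SPEC =====
-- Pre_ excludes n < 0, where math.factorial raises ValueError (in A and in B alike).
def Pre_memorybatchlimit (n : Int) : Prop := 0 ≤ n
instance (n : Int) : Decidable (Pre_memorybatchlimit n) := by unfold Pre_memorybatchlimit; infer_instance
def pvWitness_memorybatchlimit : Int := 3

def Spec_memorybatchlimit (n : Int) (out : Int) : Prop := out = memorybatchlimit_alt n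
instance (n : Int) (out : Int) : Decidable (Spec_memorybatchlimit n out) := by unfold Spec_memorybatchlimit; infer_instance

-- ===== CLAIM (what is proved, stated in full; the proofs are below) =====
def Claim_equal_memorybatchlimit : Prop := ∀ (n : Int), Dom_memorybatchlimit n → Pre_memorybatchlimit n → Spec_memorybatchlimit n (memorybatchlimit n)

-- ===== LEMMAS AND PROOFS =====

-- For n ≥ 9 the factorial is already ≥ 50000
lemma pvFactBig {m : Nat} (h : 9 ≤ m) : 50000 ≤ Nat.factorial m := by
  have h9 : Nat.factorial 9 ≤ Nat.factorial m := Nat.factorial_le h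
  have : (362880 : Nat) = Nat.factorial 9 := by decide
  omega

lemma pvA_big {f : Nat} (h : 50000 ≤ f) : pvMemLoopA f 50000 1 = 1 := by
  show pvMemLoopA f (49999 + 1) 1 = 1
  rw [pvMemLoopA, if_neg (by omega)]

lemma pvB_big {f : Int} (h : 50000 ≤ f) :
    (1 : Int) <<< PySem.Int.bitLength (-(PySem.Int.floordiv (-50000) f) - 1) = 1 := by
  have hq : -(PySem.Int.floordiv (-(50000 : Int)) f) = 1 := by
    rw [PySem.Int.neg_floordiv_neg_eq_iff_of_pos (by omega)]
    constructor <;> nlinarith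
  rw [hq]
  decide

-- ===== VERDICT (by name: the statement is the Claim_ definition above) =====
theorem memorybatchlimit_spec : Claim_equal_memorybatchlimit := by
  intro n _ hpre
  unfold Spec_memorybatchlimit memorybatchlimit memorybatchlimit_alt
  by_cases hsmall : n < 9
  · have h0 : (0 : Int) ≤ n := hpre
    interval_cases n <;> decide
  · have h9 : 9 ≤ n.toNat := by omega
    have hf : (50000 : Int) ≤ (Nat.factorial n.toNat : Int) := by
      exact_mod_cast pvFactBig h9
    show ((pvMemLoopA (Nat.factorial n.toNat) 50000 1 : Nat) : Int) =
      (1 : Int) <<< PySem.Int.bitLength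
        (-(PySem.Int.floordiv (-50000) ((Nat.factorial n.toNat : Nat) : Int)) - 1)
    rw [pvA_big (pvFactBig h9), pvB_big hf]
    norm_num
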